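-- pv_equiv track=rewrite | github.com/shirdhikiran/cloud-studio-kubernetes-finops | src/finops/clients/azure/cost_client.py | _get_cost_category_enhanced
-- ===== SOURCE A (Python) =====
-- def _get_cost_category_enhanced(service_name: str, meter_category: str,
--                               resource_type: str, consumed_service: str) -> str:
--     """Enhanced cost category detection."""
--     service_lower = service_name.lower()
--     meter_lower = meter_category.lower()
--     resource_type_lower = resource_type.lower()
--     consumed_lower = consumed_service.lower()
--
--     if (any(keyword in service_lower for keyword in ['virtual machines', 'compute', 'container service']) or
--         any(keyword in meter_lower for keyword in ['virtual machines', 'compute', 'cpu', 'container']) or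
--         'microsoft.compute' in resource_type_lower or 'microsoft.containerservice' in resource_type_lower):
--         return 'compute'
--     elif (any(keyword in service_lower for keyword in ['storage', 'blob', 'file', 'disk']) or
--           any(keyword in meter_lower for keyword in ['storage', 'disk', 'blob', 'file']) or
--           'microsoft.storage' in resource_type_lower):
--         return 'storage'
--     elif (any(keyword in service_lower for keyword in ['bandwidth', 'network', 'load balancer']) or
--           any(keyword in meter_lower for keyword in ['bandwidth', 'network', 'load balancer']) or
--           'microsoft.network' in resource_type_lower):
--         return 'network'
--     elif (any(keyword in service_lower for keyword in ['monitor', 'grafana', 'insights']) or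
--           any(keyword in meter_lower for keyword in ['monitor', 'grafana', 'insights']) or
--           'microsoft.monitor' in resource_type_lower):
--         return 'monitoring'
--     else:
--         return 'other'
-- ===== SOURCE B (Python) =====
-- _CATEGORIES = ['compute', 'storage', 'network', 'monitoring']
--
-- # Flat rule table: (priority, field index, keyword); field 0 = service name,
-- # 1 = meter category, 2 = resource type.
-- _RULES = [
--     (0, 0, 'virtual machines'), (0, 0, 'compute'), (0, 0, 'container service'),
--     (0, 1, 'virtual machines'), (0, 1, 'compute'), (0, 1, 'cpu'), (0, 1, 'container'),
--     (0, 2, 'microsoft.compute'), (0, 2, 'microsoft.containerservice'),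
--     (1, 0, 'storage'), (1, 0, 'blob'), (1, 0, 'file'), (1, 0, 'disk'),
--     (1, 1, 'storage'), (1, 1, 'disk'), (1, 1, 'blob'), (1, 1, 'file'),
--     (1, 2, 'microsoft.storage'),
--     (2, 0, 'bandwidth'), (2, 0, 'network'), (2, 0, 'load balancer'),
--     (2, 1, 'bandwidth'), (2, 1, 'network'), (2, 1, 'load balancer'),
--     (2, 2, 'microsoft.network'),
--     (3, 0, 'monitor'), (3, 0, 'grafana'), (3, 0, 'insights'),
--     (3, 1, 'monitor'), (3, 1, 'grafana'), (3, 1, 'insights'),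
--     (3, 2, 'microsoft.monitor'),
-- ]
--
--
-- def _get_cost_category_enhanced(service_name: str, meter_category: str,
--                               resource_type: str, consumed_service: str) -> str:
--     fields = (service_name.lower(), meter_category.lower(), resource_type.lower())
--     best = len(_CATEGORIES)
--     for prio, field, keyword in _RULES:
--         if prio < best and keyword in fields[field]:
--             best = prio
--     return _CATEGORIES[best] if best < len(_CATEGORIES) else 'other'
-- ===== Notes on version B (the rewrite author's own statement) =====
-- stated objective: alternative
-- what changed: Replaces the four short-circuiting if/elif category branches by a single accumulator pass over a flat (priority, field, keyword) rule table that keeps the minimum matched priority and maps it to the category name at the end.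
import Mathlib
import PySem

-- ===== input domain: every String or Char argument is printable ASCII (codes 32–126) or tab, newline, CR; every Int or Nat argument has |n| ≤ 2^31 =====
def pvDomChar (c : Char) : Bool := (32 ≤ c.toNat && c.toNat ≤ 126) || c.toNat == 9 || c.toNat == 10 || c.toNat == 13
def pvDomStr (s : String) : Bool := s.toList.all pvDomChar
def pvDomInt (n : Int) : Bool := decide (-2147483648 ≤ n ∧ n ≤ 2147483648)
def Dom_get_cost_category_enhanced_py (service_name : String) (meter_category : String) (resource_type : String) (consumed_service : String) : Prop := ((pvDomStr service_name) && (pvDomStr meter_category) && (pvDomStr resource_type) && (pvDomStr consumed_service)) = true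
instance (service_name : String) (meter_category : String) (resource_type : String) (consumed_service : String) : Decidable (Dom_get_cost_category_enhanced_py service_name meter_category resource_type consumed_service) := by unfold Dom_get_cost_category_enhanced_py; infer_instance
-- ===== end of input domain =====

-- B replaces A's four short-circuiting if/elif branches by a single accumulator pass over a
-- flat (priority, field, keyword) rule table keeping the minimum matched priority, then maps
-- that priority to the category name (alternative decomposition; same cost).

-- ===== PORT A =====
def get_cost_category_enhanced_py (service_name : String) (meter_category : String) (resource_type : String) (consumed_service : String) : String :=
  let service_lower := PySem.Str.lower service_name
  let meter_lower := PySem.Str.lower meter_category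
  let resource_type_lower := PySem.Str.lower resource_type
  let _consumed_lower := PySem.Str.lower consumed_service
  if (["virtual machines", "compute", "container service"].any (fun keyword => PySem.Str.isIn keyword service_lower) ||
      ["virtual machines", "compute", "cpu", "container"].any (fun keyword => PySem.Str.isIn keyword meter_lower) ||
      PySem.Str.isIn "microsoft.compute" resource_type_lower || PySem.Str.isIn "microsoft.containerservice" resource_type_lower) then
    "compute"
  else if (["storage", "blob", "file", "disk"].any (fun keyword => PySem.Str.isIn keyword service_lower) ||
      ["storage", "disk", "blob", "file"].any (fun keyword => PySem.Str.isIn keyword meter_lower) ||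
      PySem.Str.isIn "microsoft.storage" resource_type_lower) then
    "storage"
  else if (["bandwidth", "network", "load balancer"].any (fun keyword => PySem.Str.isIn keyword service_lower) ||
      ["bandwidth", "network", "load balancer"].any (fun keyword => PySem.Str.isIn keyword meter_lower) ||
      PySem.Str.isIn "microsoft.network" resource_type_lower) then
    "network"
  else if (["monitor", "grafana", "insights"].any (fun keyword => PySem.Str.isIn keyword service_lower) ||
      ["monitor", "grafana", "insights"].any (fun keyword => PySem.Str.isIn keyword meter_lower) ||
      PySem.Str.isIn "microsoft.monitor" resource_type_lower) then
    "monitoring"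
  else
    "other"

-- ===== PORT B =====
def pvCategories : List String := ["compute", "storage", "network", "monitoring"]

-- Source B's flat rule table: (priority, field index, keyword); field 0 = service, 1 = meter, 2 = resource type
def pvRules : List (Nat × Nat × String) :=
  [(0, 0, "virtual machines"), (0, 0, "compute"), (0, 0, "container service"),
   (0, 1, "virtual machines"), (0, 1, "compute"), (0, 1, "cpu"), (0, 1, "container"),
   (0, 2, "microsoft.compute"), (0, 2, "microsoft.containerservice"),
   (1, 0, "storage"), (1, 0, "blob"), (1, 0, "file"), (1, 0, "disk"),
   (1, 1, "storage"), (1, 1, "disk"), (1, 1, "blob"), (1, 1, "file"),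
   (1, 2, "microsoft.storage"),
   (2, 0, "bandwidth"), (2, 0, "network"), (2, 0, "load balancer"),
   (2, 1, "bandwidth"), (2, 1, "network"), (2, 1, "load balancer"),
   (2, 2, "microsoft.network"),
   (3, 0, "monitor"), (3, 0, "grafana"), (3, 0, "insights"),
   (3, 1, "monitor"), (3, 1, "grafana"), (3, 1, "insights"),
   (3, 2, "microsoft.monitor")]

-- fields[field] of Source B
def pvFieldOf (f : Nat) (sl ml rl : String) : String :=
  if f = 0 then sl else if f = 1 then ml else rl

-- the loop body of Source B: keep the minimum matched priority seen so far
def pvStep (sl ml rl : String) (best : Nat) (r : Nat × Nat × String) : Nat :=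
  if r.1 < best && PySem.Str.isIn r.2.2 (pvFieldOf r.2.1 sl ml rl) then r.1 else best

def get_cost_category_enhanced_py_alt (service_name : String) (meter_category : String) (resource_type : String) (consumed_service : String) : String :=
  let sl := PySem.Str.lower service_name
  let ml := PySem.Str.lower meter_category
  let rl := PySem.Str.lower resource_type
  let best := pvRules.foldl (pvStep sl ml rl) 4
  if best < 4 then pvCategories.getD best "other" else "other"

-- ===== PRECONDITION & SPEC =====
def Spec_get_cost_category_enhanced_py (service_name : String) (meter_category : String) (resource_type : String) (consumed_service : String) (out : String) : Prop := out = get_cost_category_enhanced_py_alt service_name meter_category resource_type consumed_service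
instance (service_name : String) (meter_category : String) (resource_type : String) (consumed_service : String) (out : String) : Decidable (Spec_get_cost_category_enhanced_py service_name meter_category resource_type consumed_service out) := by unfold Spec_get_cost_category_enhanced_py; infer_instance

-- ===== CLAIM (what is proved, stated in full; the proofs are below) =====
def Claim_equal_get_cost_category_enhanced_py : Prop := ∀ (service_name : String) (meter_category : String) (resource_type : String) (consumed_service : String), Dom_get_cost_category_enhanced_py service_name meter_category resource_type consumed_service → Spec_get_cost_category_enhanced_py service_name meter_category resource_type consumed_service (get_cost_category_enhanced_py service_name meter_category resource_type consumed_service)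

-- ===== LEMMAS AND PROOFS =====

-- the four priority groups of the rule table
def pvG0 : List (Nat × Nat × String) := pvRules.take 9
def pvG1 : List (Nat × Nat × String) := (pvRules.drop 9).take 9
def pvG2 : List (Nat × Nat × String) := (pvRules.drop 18).take 7
def pvG3 : List (Nat × Nat × String) := pvRules.drop 25

-- folding a constant-priority group from accumulator b: result is p if p < b and some rule matches
theorem pv_foldl_group (sl ml rl : String) (p : Nat) :
    ∀ (ks : List (Nat × Nat × String)), (∀ r ∈ ks, r.1 = p) → ∀ (b : Nat),
    ks.foldl (pvStep sl ml rl) b =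
      if p < b && ks.any (fun r => PySem.Str.isIn r.2.2 (pvFieldOf r.2.1 sl ml rl)) then p else b := by
  intro ks
  induction ks with
  | nil => intro _ b; simp
  | cons k ks ih =>
      intro h b
      have hk : k.1 = p := h k (List.mem_cons_self)
      have hks : ∀ r ∈ ks, r.1 = p := fun r hr => h r (List.mem_cons_of_mem _ hr)
      rw [List.foldl_cons, List.any_cons]
      by_cases hb : p < b
      · have h2 : decide (p < b) = true := decide_eq_true hb
        by_cases ht : PySem.Str.isIn k.2.2 (pvFieldOf k.2.1 sl ml rl) = true
        · have hstep : pvStep sl ml rl b k = p := by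
            unfold pvStep; rw [hk, ht, h2]; simp
          rw [hstep, ih hks p, ht, h2]
          have h1 : decide (p < p) = false := by simp
          rw [h1]; simp
        · have ht' : PySem.Str.isIn k.2.2 (pvFieldOf k.2.1 sl ml rl) = false :=
            eq_false_of_ne_true ht
          have hstep : pvStep sl ml rl b k = b := by
            unfold pvStep; rw [hk, ht']; simp
          rw [hstep, ih hks b, ht', Bool.false_or]
      · have h2 : decide (p < b) = false := decide_eq_false hb
        have hstep : pvStep sl ml rl b k = b := by
          unfold pvStep; rw [hk, h2]; simp
        rw [hstep, ih hks b, h2]; simp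

theorem get_cost_category_enhanced_py_eq (service_name meter_category resource_type consumed_service : String) :
    get_cost_category_enhanced_py service_name meter_category resource_type consumed_service =
    get_cost_category_enhanced_py_alt service_name meter_category resource_type consumed_service := by
  unfold get_cost_category_enhanced_py get_cost_category_enhanced_py_alt
  dsimp only
  have hsplit : pvRules = pvG0 ++ (pvG1 ++ (pvG2 ++ pvG3)) := by decide
  rw [hsplit, List.foldl_append, List.foldl_append, List.foldl_append]
  set sl := PySem.Str.lower service_name with hsl
  set ml := PySem.Str.lower meter_category with hml
  set rl := PySem.Str.lower resource_type with hrl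
  rw [pv_foldl_group sl ml rl 0 pvG0 (by decide),
      pv_foldl_group sl ml rl 1 pvG1 (by decide),
      pv_foldl_group sl ml rl 2 pvG2 (by decide),
      pv_foldl_group sl ml rl 3 pvG3 (by decide)]
  by_cases h0 : pvG0.any (fun r => PySem.Str.isIn r.2.2 (pvFieldOf r.2.1 sl ml rl)) = true
  · have hA : (["virtual machines", "compute", "container service"].any (fun keyword => PySem.Str.isIn keyword sl) ||
        ["virtual machines", "compute", "cpu", "container"].any (fun keyword => PySem.Str.isIn keyword ml) ||
        PySem.Str.isIn "microsoft.compute" rl || PySem.Str.isIn "microsoft.containerservice" rl) = true := by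
      simpa [pvG0, pvRules, pvFieldOf, Bool.or_assoc] using h0
    rw [hA, h0]; simp [pvCategories]
  · have h0' := eq_false_of_ne_true h0
    have hA : (["virtual machines", "compute", "container service"].any (fun keyword => PySem.Str.isIn keyword sl) ||
        ["virtual machines", "compute", "cpu", "container"].any (fun keyword => PySem.Str.isIn keyword ml) ||
        PySem.Str.isIn "microsoft.compute" rl || PySem.Str.isIn "microsoft.containerservice" rl) = false := by
      rw [← Bool.not_eq_true]
      intro hc; exact h0 (by simpa [pvG0, pvRules, pvFieldOf, Bool.or_assoc] using hc)
    by_cases h1 : pvG1.any (fun r => PySem.Str.isIn r.2.2 (pvFieldOf r.2.1 sl ml rl)) = true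
    · have hB : (["storage", "blob", "file", "disk"].any (fun keyword => PySem.Str.isIn keyword sl) ||
          ["storage", "disk", "blob", "file"].any (fun keyword => PySem.Str.isIn keyword ml) ||
          PySem.Str.isIn "microsoft.storage" rl) = true := by
        simpa [pvG1, pvRules, pvFieldOf, Bool.or_assoc] using h1
      rw [hA, hB, h0', h1]; simp [pvCategories]
    · have h1' := eq_false_of_ne_true h1
      have hB : (["storage", "blob", "file", "disk"].any (fun keyword => PySem.Str.isIn keyword sl) ||
          ["storage", "disk", "blob", "file"].any (fun keyword => PySem.Str.isIn keyword ml) ||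
          PySem.Str.isIn "microsoft.storage" rl) = false := by
        rw [← Bool.not_eq_true]
        intro hc; exact h1 (by simpa [pvG1, pvRules, pvFieldOf, Bool.or_assoc] using hc)
      by_cases h2 : pvG2.any (fun r => PySem.Str.isIn r.2.2 (pvFieldOf r.2.1 sl ml rl)) = true
      · have hC : (["bandwidth", "network", "load balancer"].any (fun keyword => PySem.Str.isIn keyword sl) ||
            ["bandwidth", "network", "load balancer"].any (fun keyword => PySem.Str.isIn keyword ml) ||
            PySem.Str.isIn "microsoft.network" rl) = true := by
          simpa [pvG2, pvRules, pvFieldOf, Bool.or_assoc] using h2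
        rw [hA, hB, hC, h0', h1', h2]; simp [pvCategories]
      · have h2' := eq_false_of_ne_true h2
        have hC : (["bandwidth", "network", "load balancer"].any (fun keyword => PySem.Str.isIn keyword sl) ||
            ["bandwidth", "network", "load balancer"].any (fun keyword => PySem.Str.isIn keyword ml) ||
            PySem.Str.isIn "microsoft.network" rl) = false := by
          rw [← Bool.not_eq_true]
          intro hc; exact h2 (by simpa [pvG2, pvRules, pvFieldOf, Bool.or_assoc] using hc)
        by_cases h3 : pvG3.any (fun r => PySem.Str.isIn r.2.2 (pvFieldOf r.2.1 sl ml rl)) = true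
        · have hD : (["monitor", "grafana", "insights"].any (fun keyword => PySem.Str.isIn keyword sl) ||
              ["monitor", "grafana", "insights"].any (fun keyword => PySem.Str.isIn keyword ml) ||
              PySem.Str.isIn "microsoft.monitor" rl) = true := by
            simpa [pvG3, pvRules, pvFieldOf, Bool.or_assoc] using h3
          rw [hA, hB, hC, hD, h0', h1', h2', h3]; simp [pvCategories]
        · have h3' := eq_false_of_ne_true h3
          have hD : (["monitor", "grafana", "insights"].any (fun keyword => PySem.Str.isIn keyword sl) ||
              ["monitor", "grafana", "insights"].any (fun keyword => PySem.Str.isIn keyword ml) ||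
              PySem.Str.isIn "microsoft.monitor" rl) = false := by
            rw [← Bool.not_eq_true]
            intro hc; exact h3 (by simpa [pvG3, pvRules, pvFieldOf, Bool.or_assoc] using hc)
          rw [hA, hB, hC, hD, h0', h1', h2', h3']; simp

-- ===== VERDICT (by name: the statement is the Claim_ definition above) =====
theorem get_cost_category_enhanced_py_spec : Claim_equal_get_cost_category_enhanced_py := by
  intro service_name meter_category resource_type consumed_service _
  exact get_cost_category_enhanced_py_eq service_name meter_category resource_type consumed_service
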